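-- pv_equiv track=rewrite | github.com/zsv28/performance_lab | task1/task1.py | circular_array
-- ===== SOURCE A (Python) =====
-- def circular_array(n, m):
--     """
--     Генерирует порядок элементов в круговом массиве размером n с шагом m,
--     начиная с первого элемента и возвращаясь к началу.
--     """
--     # Начинаем с первого элемента
--     current = 1
--     path = [current]
--
--     # Перемещаемся по массиву до тех пор, пока не вернемся к начальному элементу
--     while True:
--         current = (current + m - 2) % n + 1
--
--         if current == 1:  # Если вернулись в начало, завершаем цикл
--             break
--         path.append(current)
--
--     return path
-- ===== SOURCE B (Python) =====
-- def circular_array(n, m):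
--     """
--     Closed-form re-implementation: the k-th visited element of the circular
--     walk is (k*(m-1)) % n + 1, and the cycle length is |n| / gcd(|n|, |m-1|),
--     so the whole path is produced in one direct pass with no termination loop.
--     """
--     d = abs(m - 1)
--     a, b = abs(n), d          # hand-rolled Euclid (A imports nothing)
--     while b:
--         a, b = b, a % b
--     length = abs(n) // a      # raises ZeroDivisionError only for n == 0, m == 1
--     return [(k * (m - 1)) % n + 1 for k in range(length)]
-- ===== Notes on version B (the rewrite author's own statement) =====
-- stated objective: alternative
-- what changed: Replaces A's iterate-until-back-to-start while-loop with a closed form: cycle length |n|/gcd(|n|,|m-1|) computed by Euclid's algorithm, then the k-th element is emitted directly as (k*(m-1)) % n + 1.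
import Mathlib
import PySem

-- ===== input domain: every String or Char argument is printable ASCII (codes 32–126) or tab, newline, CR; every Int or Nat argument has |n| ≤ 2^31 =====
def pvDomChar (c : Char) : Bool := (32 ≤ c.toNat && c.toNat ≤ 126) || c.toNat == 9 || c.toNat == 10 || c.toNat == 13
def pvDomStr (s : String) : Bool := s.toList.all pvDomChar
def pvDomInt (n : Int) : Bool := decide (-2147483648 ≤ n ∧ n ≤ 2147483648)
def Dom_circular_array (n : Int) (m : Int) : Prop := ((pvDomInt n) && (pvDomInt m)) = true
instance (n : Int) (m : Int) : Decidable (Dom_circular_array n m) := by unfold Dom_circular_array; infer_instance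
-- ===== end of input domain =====

-- B replaces A's iterate-until-back-to-start loop by a gcd-derived cycle length and the
-- closed form (k*(m-1)) % n + 1; objective: alternative (same asymptotic cost).


-- ===== PORT A =====
-- while-True loop of A; fuel n.natAbs suffices (the cycle length divides |n|) and only
-- makes the recursion total — inside Pre_ the loop always breaks before fuel runs out.
def aLoop (n : Int) (m : Int) : Int → List Int → Nat → List Int
  | _, path, 0 => path
  | current, path, fuel + 1 =>
    if PySem.Int.mod (current + m - 2) n + 1 = 1 then path
    else aLoop n m (PySem.Int.mod (current + m - 2) n + 1)
      (path ++ [PySem.Int.mod (current + m - 2) n + 1]) fuel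

def circular_array (n : Int) (m : Int) : List Int :=
  aLoop n m 1 [1] n.natAbs

-- ===== PORT B =====
-- hand-rolled Euclid loop of Source B (operands are the nonneg ints abs(n), abs(m-1))
def bGcd (a : Nat) (b : Nat) : Nat :=
  if b = 0 then a else bGcd b (a % b)
termination_by b
decreasing_by exact Nat.mod_lt _ (Nat.pos_of_ne_zero ‹b ≠ 0›)

def circular_array_alt (n : Int) (m : Int) : List Int :=
  let d : Nat := (m - 1).natAbs
  let g : Nat := bGcd n.natAbs d
  let length : Nat := n.natAbs / g
  (List.range length).map (fun (k : Nat) => PySem.Int.mod ((k : Int) * (m - 1)) n + 1)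

-- ===== PRECONDITION & SPEC =====
-- A raises ZeroDivisionError at '(current + m - 2) % n' when n = 0; Pre_ excludes exactly that.
def Pre_circular_array (n : Int) (m : Int) : Prop := n ≠ 0
instance (n : Int) (m : Int) : Decidable (Pre_circular_array n m) := by unfold Pre_circular_array; infer_instance
def pvWitness_circular_array : Int × Int := (5, 2)

def Spec_circular_array (n : Int) (m : Int) (out : List Int) : Prop := out = circular_array_alt n m
instance (n : Int) (m : Int) (out : List Int) : Decidable (Spec_circular_array n m out) := by unfold Spec_circular_array; infer_instance

-- ===== CLAIM (what is proved, stated in full; the proofs are below) =====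
def Claim_equal_circular_array : Prop := ∀ (n : Int) (m : Int), Dom_circular_array n m → Pre_circular_array n m → Spec_circular_array n m (circular_array n m)

-- ===== LEMMAS AND PROOFS =====

theorem bGcd_eq_gcd (a b : Nat) : bGcd a b = Nat.gcd b a := by
  fun_induction bGcd a b with
  | case1 a => simp
  | case2 a b hb ih => rw [ih]; exact (Nat.gcd_rec b a).symm

theorem dvd_mul_iff_div_gcd_dvd (a b k : Nat) (ha : a ≠ 0) :
    a ∣ k * b ↔ a / Nat.gcd a b ∣ k := by
  have hg : 0 < Nat.gcd a b := Nat.gcd_pos_of_pos_left _ (Nat.pos_of_ne_zero ha)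
  have ha' : a = Nat.gcd a b * (a / Nat.gcd a b) := (Nat.mul_div_cancel' (Nat.gcd_dvd_left a b)).symm
  have key : Nat.gcd a b * (k * (b / Nat.gcd a b)) = k * b := by
    rw [mul_comm k (b / Nat.gcd a b), ← mul_assoc, Nat.mul_div_cancel' (Nat.gcd_dvd_right a b), mul_comm]
  have hcop : Nat.Coprime (a / Nat.gcd a b) (b / Nat.gcd a b) := Nat.coprime_div_gcd_div_gcd hg
  constructor
  · intro h
    have h2 : Nat.gcd a b * (a / Nat.gcd a b) ∣ Nat.gcd a b * (k * (b / Nat.gcd a b)) := by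
      rw [← ha', key]; exact h
    exact hcop.dvd_of_dvd_mul_right ((Nat.mul_dvd_mul_iff_left hg).mp h2)
  · intro h
    have h3 : Nat.gcd a b * (a / Nat.gcd a b) ∣ Nat.gcd a b * (k * (b / Nat.gcd a b)) :=
      Nat.mul_dvd_mul_left _ (h.mul_right _)
    rw [← ha', key] at h3; exact h3

-- the value visited at step k
def pvF (n m : Int) (k : Nat) : Int := PySem.Int.mod ((k : Int) * (m - 1)) n + 1

theorem pvF_step (n m : Int) (k : Nat) :
    PySem.Int.mod (pvF n m k + m - 2) n + 1 = pvF n m (k + 1) := by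
  unfold pvF
  have h1 : PySem.Int.mod ((k : Int) * (m - 1)) n + 1 + m - 2
      = PySem.Int.mod ((k : Int) * (m - 1)) n + (m - 1) := by ring
  have h2 : (k : Int) * (m - 1) + (m - 1) = ((k + 1 : Nat) : Int) * (m - 1) := by push_cast; ring
  rw [h1]
  simp only [PySem.Int.mod, Int.fmod_add_fmod, h2]

theorem pvF_eq_one_iff (n m : Int) (k : Nat) (hn : n ≠ 0) :
    pvF n m k = 1 ↔ n.natAbs / Nat.gcd n.natAbs (m - 1).natAbs ∣ k := by
  have h0 : pvF n m k = 1 ↔ PySem.Int.mod ((k : Int) * (m - 1)) n = 0 := by unfold pvF; omega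
  rw [h0, PySem.Int.mod_eq_zero_iff_dvd, ← Int.natAbs_dvd_natAbs, Int.natAbs_mul, Int.natAbs_natCast,
    dvd_mul_iff_div_gcd_dvd _ _ _ (Int.natAbs_ne_zero.mpr hn)]

theorem aLoop_eq (n m : Int) (hn : n ≠ 0) (L : Nat)
    (hL : L = n.natAbs / Nat.gcd n.natAbs (m - 1).natAbs) :
    ∀ (fuel j : Nat), j < L → L ≤ j + fuel →
      aLoop n m (pvF n m j) ((List.range (j + 1)).map (pvF n m)) fuel
        = (List.range L).map (pvF n m) := by
  intro fuel
  induction fuel with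
  | zero => intro j hj hle; omega
  | succ f ih =>
    intro j hj hle
    rw [aLoop, pvF_step]
    by_cases h1 : pvF n m (j + 1) = 1
    · rw [if_pos h1]
      have hdvd : L ∣ j + 1 := by
        have := (pvF_eq_one_iff n m (j + 1) hn).mp h1; rwa [← hL] at this
      have hj1 : j + 1 = L := by
        have := Nat.le_of_dvd (Nat.succ_pos j) hdvd; omega
      rw [hj1]
    · rw [if_neg h1]
      have hnd : ¬ L ∣ j + 1 := by
        intro hd
        exact h1 ((pvF_eq_one_iff n m (j + 1) hn).mpr (hL ▸ hd))
      have hj1 : j + 1 < L := by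
        rcases Nat.lt_or_ge (j + 1) L with h | h
        · exact h
        · exact absurd (by omega : j + 1 = L) (fun he => hnd (he ▸ dvd_refl L))
      have hrange : (List.range (j + 1)).map (pvF n m) ++ [pvF n m (j + 1)]
          = (List.range (j + 1 + 1)).map (pvF n m) := by
        simp [List.range_succ]
      rw [hrange]
      exact ih (j + 1) hj1 (by omega)

-- ===== VERDICT (by name: the statement is the Claim_ definition above) =====
theorem pvF_zero (n m : Int) : pvF n m 0 = 1 := by
  simp [pvF, PySem.Int.mod]

theorem circular_array_spec : Claim_equal_circular_array := by
  intro n m _ hpre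
  unfold Spec_circular_array
  have hnpos : 0 < n.natAbs := Int.natAbs_pos.mpr hpre
  have hg : 0 < Nat.gcd n.natAbs (m - 1).natAbs := Nat.gcd_pos_of_pos_left _ hnpos
  have hLpos : 0 < n.natAbs / Nat.gcd n.natAbs (m - 1).natAbs :=
    Nat.div_pos (Nat.gcd_le_left _ hnpos) hg
  have hstart : ([1] : List Int) = (List.range (0 + 1)).map (pvF n m) := by
    simp [pvF_zero]
  have hA : circular_array n m = (List.range (n.natAbs / Nat.gcd n.natAbs (m - 1).natAbs)).map (pvF n m) := by
    unfold circular_array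
    have hLle : n.natAbs / Nat.gcd n.natAbs (m - 1).natAbs ≤ n.natAbs := Nat.div_le_self _ _
    conv_lhs => rw [hstart, show (1 : Int) = pvF n m 0 from (pvF_zero n m).symm]
    exact aLoop_eq n m hpre _ rfl n.natAbs 0 hLpos (by omega)
  have hB : circular_array_alt n m = (List.range (n.natAbs / Nat.gcd n.natAbs (m - 1).natAbs)).map (pvF n m) := by
    show (List.range (n.natAbs / bGcd n.natAbs (m - 1).natAbs)).map
        (fun (k : Nat) => PySem.Int.mod ((k : Int) * (m - 1)) n + 1) = _
    rw [bGcd_eq_gcd, Nat.gcd_comm]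
    rfl
  rw [hA, hB]
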